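-- pv_equiv track=rewrite | github.com/DamianBewicz/PythonGame | utils.py | count_class_occurances
-- ===== SOURCE A (Python) =====
-- def count_class_occurances(list_of_classes: list, names_set: set) -> dict:
--     class_occurances = {}
--     list_of_names = list(names_set)
--     list_of_names.sort()
--     for class_name in list_of_names:
--         count = 0
--         for cls in list_of_classes:
--             if cls.__str__() == class_name:
--                 count += 1
--         class_occurances[class_name] = count
--     return class_occurances
-- ===== SOURCE B (Python) =====
-- def count_class_occurances(list_of_classes: list, names_set: set) -> dict:
--     tally = {}
--     for cls in list_of_classes:
--         key = cls.__str__()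
--         tally[key] = tally.get(key, 0) + 1
--     return {name: tally.get(name, 0) for name in sorted(names_set)}
-- ===== Notes on version B (the rewrite author's own statement) =====
-- stated objective: faster
-- what changed: Replaces A's per-name rescan of the whole class list (nested loops) with a single counting pass that builds a tally dict, then a dict comprehension over the sorted names reading each count once.
import Mathlib
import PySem

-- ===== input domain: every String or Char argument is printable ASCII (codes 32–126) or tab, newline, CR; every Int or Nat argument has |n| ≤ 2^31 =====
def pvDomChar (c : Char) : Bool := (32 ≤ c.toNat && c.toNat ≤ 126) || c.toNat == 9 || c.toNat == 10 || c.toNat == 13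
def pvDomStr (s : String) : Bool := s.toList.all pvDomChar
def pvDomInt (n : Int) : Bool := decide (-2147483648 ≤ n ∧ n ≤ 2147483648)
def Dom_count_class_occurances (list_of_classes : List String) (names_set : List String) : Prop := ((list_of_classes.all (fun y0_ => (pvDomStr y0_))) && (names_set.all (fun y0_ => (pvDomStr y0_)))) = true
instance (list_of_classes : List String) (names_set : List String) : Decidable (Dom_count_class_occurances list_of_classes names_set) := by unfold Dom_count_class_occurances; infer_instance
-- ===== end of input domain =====

-- B replaces A's per-name rescan of the class list (nested loops) with a one-pass tally dict
-- read back by a dict comprehension over the sorted names (faster).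


-- ===== PORT A =====
-- for each sorted name, rescan list_of_classes counting matches, then insert
def count_class_occurances (list_of_classes : List String) (names_set : List String) : List (String × Int) :=
  let list_of_names := PySem.List.sorted names_set (fun x => x) false
  (list_of_names.foldl
    (fun d class_name =>
      d.insert class_name
        (list_of_classes.foldl (fun count cls => if cls == class_name then count + 1 else count) 0))
    (PySem.Dict.empty : PySem.Dict String Int)).items

-- ===== PORT B =====
-- one counting pass builds a tally dict; a dict comprehension over the sorted names reads it back
def count_class_occurances_alt (list_of_classes : List String) (names_set : List String) : List (String × Int) :=
  let tally : PySem.Dict String Int :=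
    list_of_classes.foldl (fun t cls => t.insert cls (t.getD cls 0 + 1)) PySem.Dict.empty
  (PySem.Dict.ofList
    ((PySem.List.sorted names_set (fun x => x) false).map (fun name => (name, tally.getD name 0)))).items

-- ===== PRECONDITION & SPEC =====
-- names_set is a Python set, so its List representation holds DISTINCT elements (the type convention);
-- Pre_ states exactly that and excludes nothing a Python caller can pass.
def Pre_count_class_occurances (_list_of_classes : List String) (names_set : List String) : Prop :=
  names_set.Nodup
instance (list_of_classes : List String) (names_set : List String) : Decidable (Pre_count_class_occurances list_of_classes names_set) := by unfold Pre_count_class_occurances; infer_instance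
def pvWitness_count_class_occurances : List String × List String := (["b", "a", "b"], ["a", "c"])

def Spec_count_class_occurances (list_of_classes : List String) (names_set : List String) (out : List (String × Int)) : Prop := out = count_class_occurances_alt list_of_classes names_set
instance (list_of_classes : List String) (names_set : List String) (out : List (String × Int)) : Decidable (Spec_count_class_occurances list_of_classes names_set out) := by unfold Spec_count_class_occurances; infer_instance

-- ===== CLAIM (what is proved, stated in full; the proofs are below) =====
def Claim_equal_count_class_occurances : Prop := ∀ (list_of_classes : List String) (names_set : List String), Dom_count_class_occurances list_of_classes names_set → Pre_count_class_occurances list_of_classes names_set → Spec_count_class_occurances list_of_classes names_set (count_class_occurances list_of_classes names_set)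

-- ===== LEMMAS AND PROOFS =====

-- both ports' items list the sorted distinct names paired with their counts in list_of_classes

theorem items_A (locs ns : List String) (hnd : ns.Nodup) :
    count_class_occurances locs ns
      = (PySem.List.sorted ns (fun x => x) false).map (fun n => (n, (locs.count n : Int))) := by
  unfold count_class_occurances
  have hL : (PySem.List.sorted ns (fun x => x) false).Nodup :=
    (PySem.List.sorted_perm ns (fun x => x) false).nodup_iff.mpr hnd
  rw [PySem.Dict.items_foldl_insert_fresh _ (fun n => n)
        (fun n => locs.foldl (fun count cls => if cls == n then count + 1 else count) 0)
        PySem.Dict.empty (by intro a _; exact PySem.Dict.contains_empty a) (by simpa using hL)]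
  simp only [PySem.Dict.empty, List.nil_append]
  apply List.map_congr_left
  intro n _
  have := PySem.List.foldl_count_if (fun cls => cls == n) locs 0
  simp only [this, List.count, zero_add]

theorem items_B (locs ns : List String) (hnd : ns.Nodup) :
    count_class_occurances_alt locs ns
      = (PySem.List.sorted ns (fun x => x) false).map (fun n => (n, (locs.count n : Int))) := by
  unfold count_class_occurances_alt
  have hL : (PySem.List.sorted ns (fun x => x) false).Nodup :=
    (PySem.List.sorted_perm ns (fun x => x) false).nodup_iff.mpr hnd
  -- the dict comprehension over distinct keys lists exactly its pairs
  unfold PySem.Dict.ofList PySem.Dict.update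
  rw [PySem.Dict.items_foldl_insert_fresh _ Prod.fst Prod.snd PySem.Dict.empty
        (fun a _ => PySem.Dict.contains_empty a.1)
        (by simpa [List.map_map, Function.comp_def] using hL)]
  simp only [PySem.Dict.empty, List.nil_append, List.map_map, Function.comp_def]
  apply List.map_congr_left
  intro n _
  -- the tally's stored value at n is the count of n
  rw [PySem.Dict.getD_foldl_insert_add_one]
  simp [PySem.Dict.getD, PySem.Dict.get?]

-- ===== VERDICT (by name: the statement is the Claim_ definition above) =====
theorem count_class_occurances_spec : Claim_equal_count_class_occurances := by
  intro locs ns _ hpre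
  unfold Spec_count_class_occurances
  rw [items_A locs ns hpre, items_B locs ns hpre]
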